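-- pv_equiv track=rewrite | github.com/OliverObst/artificial-intelligence | src/ai9414/logic/parser.py | _normalise_clauses
-- ===== SOURCE A (Python) =====
-- def _normalise_clauses(clauses: list[list[str]]) -> list[list[str]]:
--     normalised: list[list[str]] = []
--     for clause in clauses:
--         seen: dict[str, bool] = {}
--         tautology = False
--         for literal in clause:
--             variable = literal[1:] if literal.startswith("~") else literal
--             is_positive = not literal.startswith("~")
--             if variable in seen and seen[variable] != is_positive:
--                 tautology = True
--                 break
--             seen[variable] = is_positive
--         if tautology:
--             continue
--         ordered = [
--             variable if is_positive else f"~{variable}"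
--             for variable, is_positive in sorted(seen.items(), key=lambda item: item[0])
--         ]
--         normalised.append(ordered)
--     return normalised
-- ===== SOURCE B (Python) =====
-- def _normalise_clauses(clauses: list[list[str]]) -> list[list[str]]:
--     normalised: list[list[str]] = []
--     for clause in clauses:
--         # sort literals by their variable name, then scan adjacent entries:
--         # equal variable + equal polarity = duplicate (skip), equal variable +
--         # opposite polarity = tautology (drop the clause).
--         ordered: list[str] = []
--         tautology = False
--         prev = None  # (variable, is_positive) of the last emitted literal
--         for literal in sorted(clause, key=lambda l: l[1:] if l.startswith("~") else l):
--             variable = literal[1:] if literal.startswith("~") else literal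
--             is_positive = not literal.startswith("~")
--             if prev is not None and prev[0] == variable:
--                 if prev[1] == is_positive:
--                     continue
--                 tautology = True
--                 break
--             ordered.append(literal)
--             prev = (variable, is_positive)
--         if not tautology:
--             normalised.append(ordered)
--     return normalised
-- ===== Notes on version B (the rewrite author's own statement) =====
-- stated objective: alternative
-- what changed: Replaces A's running variable->polarity dict with early break by sort-then-adjacent-scan: each clause's literals are sorted by variable name first, then a single linear scan over the sorted list skips adjacent duplicates and detects a tautology as two adjacent literals with the same variable and opposite polarity; no dict or set is built.
import Mathlib
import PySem

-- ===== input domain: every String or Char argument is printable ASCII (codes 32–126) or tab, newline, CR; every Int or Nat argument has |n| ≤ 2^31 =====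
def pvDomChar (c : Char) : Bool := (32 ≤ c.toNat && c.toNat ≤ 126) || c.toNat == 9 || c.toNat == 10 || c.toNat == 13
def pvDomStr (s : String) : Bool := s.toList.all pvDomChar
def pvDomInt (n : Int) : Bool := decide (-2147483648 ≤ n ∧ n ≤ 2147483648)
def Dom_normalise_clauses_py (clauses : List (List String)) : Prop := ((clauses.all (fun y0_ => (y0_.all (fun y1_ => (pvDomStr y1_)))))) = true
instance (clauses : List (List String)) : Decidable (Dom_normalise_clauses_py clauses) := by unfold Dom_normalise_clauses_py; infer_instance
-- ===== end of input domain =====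

-- B replaces A's running variable→polarity dict (with early break, then a sort of the
-- surviving items) by sort-then-adjacent-scan: sort the clause's literals by variable
-- name first, then one linear scan skips adjacent duplicates and flags a tautology as
-- two adjacent literals with the same variable and opposite polarity — objective:
-- alternative (no dict/set per clause). Both are pure (no mutation).

-- ===== PORT A =====
-- 'variable = literal[1:] if literal.startswith("~") else literal' / 'is_positive = not literal.startswith("~")'
def pvVar (lit : String) : String :=
  if PySem.Str.startswith lit "~" then PySem.Str.slice lit (some 1) none else lit
def pvIsPos (lit : String) : Bool := !(PySem.Str.startswith lit "~")

-- A's inner 'for literal in clause' loop with its tautology break (none = broke out)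
def pvScanA : List String → PySem.Dict String Bool → Option (PySem.Dict String Bool)
  | [], seen => some seen
  | literal :: rest, seen =>
    match seen.get? (pvVar literal) with
    | some b => if b ≠ pvIsPos literal then none
                else pvScanA rest (seen.insert (pvVar literal) (pvIsPos literal))
    | none => pvScanA rest (seen.insert (pvVar literal) (pvIsPos literal))

def normalise_clauses_py (clauses : List (List String)) : List (List String) :=
  clauses.foldl (fun normalised clause =>
    match pvScanA clause PySem.Dict.empty with
    | none => normalised   -- tautology: continue
    | some seen =>
        normalised ++ [(PySem.List.sorted seen.items (fun item => item.1) false).map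
          (fun item => if item.2 then item.1 else "~" ++ item.1)]) []

-- ===== PORT B =====
-- B's inner loop over the variable-sorted literals: prev = (variable, is_positive) of the
-- last emitted literal; equal variable + equal polarity -> 'continue', opposite -> break (none)
def pvScanB : List String → Option (String × Bool) → List String → Option (List String)
  | [], _, ordered => some ordered
  | literal :: rest, prev, ordered =>
    match prev with
    | some (pv, pp) =>
      if pv = pvVar literal then
        if pp = pvIsPos literal then pvScanB rest prev ordered
        else none
      else pvScanB rest (some (pvVar literal, pvIsPos literal)) (ordered ++ [literal])
    | none => pvScanB rest (some (pvVar literal, pvIsPos literal)) (ordered ++ [literal])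

def normalise_clauses_py_alt (clauses : List (List String)) : List (List String) :=
  clauses.foldl (fun normalised clause =>
    match pvScanB (PySem.List.sorted clause pvVar false) none [] with
    | none => normalised
    | some ordered => normalised ++ [ordered]) []

-- ===== PRECONDITION & SPEC =====
def Spec_normalise_clauses_py (clauses : List (List String)) (out : List (List String)) : Prop := out = normalise_clauses_py_alt clauses
instance (clauses : List (List String)) (out : List (List String)) : Decidable (Spec_normalise_clauses_py clauses out) := by unfold Spec_normalise_clauses_py; infer_instance

-- ===== CLAIM (what is proved, stated in full; the proofs are below) =====
def Claim_equal_normalise_clauses_py : Prop := ∀ (clauses : List (List String)), Dom_normalise_clauses_py clauses → Spec_normalise_clauses_py clauses (normalise_clauses_py clauses)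

-- ===== LEMMAS AND PROOFS =====

-- proof-side canonical views of a clause: its positive / negative variable sets
def pvPos (clause : List String) : PySem.Set String :=
  PySem.Set.ofList (clause.filter (fun l => !(PySem.Str.startswith l "~")))
def pvNeg (clause : List String) : PySem.Set String :=
  PySem.Set.ofList ((clause.filter (fun l => PySem.Str.startswith l "~")).map
    (fun l => PySem.Str.slice l (some 1) none))

-- the literal a consistent clause carries for variable v
def pvTag (clause : List String) (v : String) : String :=
  if PySem.Set.contains (pvPos clause) v then v else "~" ++ v

-- a positive literal is its own variable
theorem pvVar_of_pos {lit : String} (h : pvIsPos lit = true) : pvVar lit = lit := by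
  unfold pvIsPos at h
  unfold pvVar
  cases hs : PySem.Str.startswith lit "~"
  · simp
  · rw [hs] at h
    simp at h

theorem pvVar_of_neg {lit : String} (h : pvIsPos lit = false) :
    PySem.Str.startswith lit "~" = true ∧ pvVar lit = PySem.Str.slice lit (some 1) none := by
  unfold pvIsPos at h
  cases hs : PySem.Str.startswith lit "~"
  · rw [hs] at h; simp at h
  · exact ⟨rfl, by unfold pvVar; rw [if_pos hs]⟩

-- a literal that starts with '~' is '~' ++ its variable
theorem tilde_var {lit : String} (h : pvIsPos lit = false) : "~" ++ pvVar lit = lit := by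
  obtain ⟨hs, hv⟩ := pvVar_of_neg h
  rw [hv]
  simp [PySem.Str.startswith, PySem.Chars.startswith, List.isPrefixOf_iff_prefix] at hs
  obtain ⟨rest, hrest⟩ := hs
  have h1 : lit.toList = '~' :: rest := by simpa using hrest.symm
  have h2 : ("~" ++ PySem.Str.slice lit (some 1) none).toList = lit.toList := by
    simp [PySem.Str.slice, h1, PySem.Chars.slice, PySem.List.slice_from_one]
  exact String.toList_inj.mp h2

theorem mem_pvPos_iff {clause : List String} {v : String} :
    v ∈ pvPos clause ↔ v ∈ clause ∧ pvIsPos v = true := by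
  unfold pvPos
  rw [PySem.Set.mem_ofList, List.mem_filter]
  unfold pvIsPos
  simp

theorem mem_pvNeg_iff {clause : List String} {v : String} :
    v ∈ pvNeg clause ↔ ∃ lit ∈ clause, pvIsPos lit = false ∧ pvVar lit = v := by
  unfold pvNeg
  rw [PySem.Set.mem_ofList]
  constructor
  · intro h
    rcases List.mem_map.mp h with ⟨lit, hlit, rfl⟩
    rcases List.mem_filter.mp hlit with ⟨hmem, hneg⟩
    have hpneg : pvIsPos lit = false := by unfold pvIsPos; rw [hneg]; rfl
    exact ⟨lit, hmem, hpneg, (pvVar_of_neg hpneg).2⟩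
  · rintro ⟨lit, hmem, hneg, rfl⟩
    rcases pvVar_of_neg hneg with ⟨hs, hv⟩
    exact List.mem_map.mpr ⟨lit, List.mem_filter.mpr ⟨hmem, hs⟩, hv.symm⟩

-- membership in the variable set of a clause
theorem mem_union_iff {clause : List String} {v : String} :
    v ∈ PySem.Set.union (pvPos clause) (pvNeg clause) ↔ ∃ lit ∈ clause, pvVar lit = v := by
  rw [PySem.Set.mem_union, mem_pvPos_iff, mem_pvNeg_iff]
  constructor
  · rintro (⟨hmem, hpos⟩ | ⟨lit, hmem, _, rfl⟩)
    · exact ⟨v, hmem, pvVar_of_pos hpos⟩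
    · exact ⟨lit, hmem, rfl⟩
  · rintro ⟨lit, hmem, rfl⟩
    cases hp : pvIsPos lit
    · exact Or.inr ⟨lit, hmem, hp, rfl⟩
    · exact Or.inl ⟨by rwa [pvVar_of_pos hp], by rwa [pvVar_of_pos hp]⟩

-- consistency of a clause: every literal's polarity is 'its variable is in pos'
def pvOK (clause : List String) : Prop :=
  ∀ lit ∈ clause, PySem.Set.contains (pvPos clause) (pvVar lit) = pvIsPos lit

theorem empty_inter_iff {clause : List String} :
    PySem.Set.inter (pvPos clause) (pvNeg clause) = [] ↔ pvOK clause := by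
  constructor
  · intro h lit hmem
    cases hp : pvIsPos lit
    · cases hc : PySem.Set.contains (pvPos clause) (pvVar lit)
      · rfl
      · exfalso
        have hvpos : pvVar lit ∈ pvPos clause := (PySem.Set.contains_iff _ _).mp hc
        have hvneg : pvVar lit ∈ pvNeg clause := mem_pvNeg_iff.mpr ⟨lit, hmem, hp, rfl⟩
        have : pvVar lit ∈ PySem.Set.inter (pvPos clause) (pvNeg clause) :=
          (PySem.Set.mem_inter _ _ _).mpr ⟨hvpos, hvneg⟩
        rw [h] at this
        exact absurd this List.not_mem_nil
    · rw [pvVar_of_pos hp]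
      exact (PySem.Set.contains_iff _ _).mpr (mem_pvPos_iff.mpr ⟨hmem, hp⟩)
  · intro hok
    by_contra hne
    rcases List.exists_mem_of_ne_nil _ hne with ⟨v, hv⟩
    rcases (PySem.Set.mem_inter _ _ _).mp hv with ⟨hvpos, hvneg⟩
    rcases mem_pvNeg_iff.mp hvneg with ⟨lit, hmem, hneg, rfl⟩
    have h1 := hok lit hmem
    rw [hneg] at h1
    rcases mem_pvPos_iff.mp hvpos with ⟨hvmem, hvpos'⟩
    have h2 := hok _ hvmem
    rw [hvpos', pvVar_of_pos hvpos'] at h2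
    rw [h2] at h1
    exact Bool.true_eq_false.mp h1

-- on a consistent clause, a literal is the tag of its variable
theorem pvTag_self {clause : List String} (hok : pvOK clause) {lit : String}
    (h : lit ∈ clause) : pvTag clause (pvVar lit) = lit := by
  unfold pvTag
  rw [hok lit h]
  cases hp : pvIsPos lit
  · simp only [Bool.false_eq_true, if_false]
    exact tilde_var hp
  · simp only [if_true]
    exact pvVar_of_pos hp

-- ==== A-side: the scan loop of A on a consistent clause runs to completion ====
theorem pvScanA_some {l : List String} {polf : String → Bool}
    (hl : ∀ lit ∈ l, pvIsPos lit = polf (pvVar lit)) :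
    ∀ seen : PySem.Dict String Bool, (∀ v b, seen.get? v = some b → b = polf v) →
      pvScanA l seen = some (l.foldl (fun d lit => d.insert (pvVar lit) (pvIsPos lit)) seen) := by
  induction l with
  | nil => intro seen _; rfl
  | cons lit rest ih =>
    intro seen hseen
    have hhead := hl lit List.mem_cons_self
    have hrest : ∀ l' ∈ rest, pvIsPos l' = polf (pvVar l') :=
      fun l' h => hl l' (List.mem_cons_of_mem _ h)
    have hseen' : ∀ v b, (seen.insert (pvVar lit) (pvIsPos lit)).get? v = some b → b = polf v := by
      intro v b hb
      rw [PySem.Dict.get?_insert] at hb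
      split at hb
      · rename_i hveq
        subst hveq
        rw [← hhead]
        exact (Option.some.injEq _ _).mp hb.symm
      · exact hseen v b hb
    rw [List.foldl_cons]
    cases hget : seen.get? (pvVar lit) with
    | none => simp only [pvScanA, hget]; exact ih hrest _ hseen'
    | some b =>
      have hb : b = pvIsPos lit := by rw [hseen _ _ hget, hhead]
      simp only [pvScanA, hget, hb, ne_eq, not_true_eq_false, if_false]
      exact ih hrest _ hseen'

-- consistency of the tail of the scan relative to an extended dict lifts to the whole scan state
def pvGood (l : List String) (seen : PySem.Dict String Bool) : Prop :=
  (∀ lit ∈ l, ∀ b, seen.get? (pvVar lit) = some b → b = pvIsPos lit) ∧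
  (∀ lit ∈ l, ∀ lit' ∈ l, pvVar lit = pvVar lit' → pvIsPos lit = pvIsPos lit')

theorem pvGood_cons {lit : String} {rest : List String} {seen : PySem.Dict String Bool}
    (hc : ∀ b, seen.get? (pvVar lit) = some b → b = pvIsPos lit)
    (hg : pvGood rest (seen.insert (pvVar lit) (pvIsPos lit))) :
    pvGood (lit :: rest) seen := by
  obtain ⟨hg1, hg2⟩ := hg
  have hsame : ∀ y ∈ rest, pvVar y = pvVar lit → pvIsPos lit = pvIsPos y := by
    intro y hy hvy
    apply hg1 y hy
    rw [PySem.Dict.get?_insert, if_pos hvy]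
  constructor
  · intro x hx b hb
    rcases List.mem_cons.mp hx with rfl | hx
    · exact hc b hb
    · by_cases hveq : pvVar x = pvVar lit
      · rw [hveq] at hb
        rw [hc b hb]
        exact hsame x hx hveq
      · apply hg1 x hx
        rw [PySem.Dict.get?_insert, if_neg hveq, hb]
  · intro x hx y hy hvxy
    rcases List.mem_cons.mp hx with hx' | hx'
    · rcases List.mem_cons.mp hy with hy' | hy'
      · rw [hx', hy']
      · rw [hx'] at hvxy ⊢
        exact hsame y hy' hvxy.symm
    · rcases List.mem_cons.mp hy with hy' | hy'
      · rw [hy'] at hvxy ⊢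
        exact (hsame x hx' hvxy).symm
      · exact hg2 x hx' y hy' hvxy

theorem pvScanA_none_of_not_good :
    ∀ (l : List String) (seen : PySem.Dict String Bool), ¬ pvGood l seen →
      pvScanA l seen = none := by
  intro l
  induction l with
  | nil =>
    intro seen hbad
    exact absurd ⟨fun x hx => absurd hx List.not_mem_nil,
                  fun x hx => absurd hx List.not_mem_nil⟩ hbad
  | cons lit rest ih =>
    intro seen hbad
    cases hget : seen.get? (pvVar lit) with
    | none =>
      simp only [pvScanA, hget]
      apply ih
      intro hg
      exact hbad (pvGood_cons (fun b hb => by rw [hget] at hb; cases hb) hg)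
    | some b =>
      by_cases hb : b = pvIsPos lit
      · simp only [pvScanA, hget, hb, ne_eq, not_true_eq_false, if_false]
        apply ih
        intro hg
        exact hbad (pvGood_cons (fun b' hb' => by
          rw [hget] at hb'
          rw [← (Option.some.injEq _ _).mp hb', hb]) hg)
      · simp only [pvScanA, hget, ne_eq, hb, not_false_eq_true, if_true]

theorem pvScanA_none {clause : List String} (hfail : ¬ pvOK clause) :
    pvScanA clause PySem.Dict.empty = none := by
  apply pvScanA_none_of_not_good
  intro hg
  apply hfail
  intro lit hmem
  cases hp : pvIsPos lit
  · cases hc : PySem.Set.contains (pvPos clause) (pvVar lit)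
    · rfl
    · exfalso
      have hvpos : pvVar lit ∈ pvPos clause := (PySem.Set.contains_iff _ _).mp hc
      rcases mem_pvPos_iff.mp hvpos with ⟨hvmem, hvp⟩
      have := hg.2 _ hvmem lit hmem (by rw [pvVar_of_pos hvp])
      rw [hvp, hp] at this
      exact Bool.true_eq_false.mp this
  · rw [pvVar_of_pos hp]
    exact (PySem.Set.contains_iff _ _).mpr (mem_pvPos_iff.mpr ⟨hmem, hp⟩)

-- ==== A-side: values stored by A's completed scan ====
theorem getD_foldl_pv {l : List String} {polf : String → Bool}
    (hl : ∀ lit ∈ l, pvIsPos lit = polf (pvVar lit)) :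
    ∀ d : PySem.Dict String Bool, (∀ v, d.getD v (polf v) = polf v) →
      ∀ v, ((l.foldl (fun d lit => d.insert (pvVar lit) (pvIsPos lit)) d).getD v (polf v)) = polf v := by
  induction l with
  | nil => intro d hd v; exact hd v
  | cons lit rest ih =>
    intro d hd v
    rw [List.foldl_cons]
    refine ih (fun l' h => hl l' (List.mem_cons_of_mem _ h)) _ ?_ v
    intro w
    rw [PySem.Dict.getD_insert]
    split
    · rename_i hw
      rw [hw, ← hl lit List.mem_cons_self]
    · exact hd w

-- ==== B-side: the emitted literals of B's scan (adjacent dedup over the sorted list) ====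
def pvDD : Option String → List String → List String
  | _, [] => []
  | p, lit :: rest =>
    if p = some (pvVar lit) then pvDD p rest else lit :: pvDD (some (pvVar lit)) rest

theorem pvDD_spec :
    ∀ (L : List String) (p : Option String),
      L.Pairwise (fun a b => pvVar a ≤ pvVar b) →
      (∀ v, p = some v → ∀ lit ∈ L, v ≤ pvVar lit) →
      (∀ x ∈ pvDD p L, x ∈ L) ∧
      (∀ w, w ∈ (pvDD p L).map pvVar ↔ some w ≠ p ∧ ∃ lit ∈ L, pvVar lit = w) ∧
      ((pvDD p L).map pvVar).Pairwise (· < ·) := by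
  intro L
  induction L with
  | nil =>
    intro p _ _
    refine ⟨fun x hx => absurd hx List.not_mem_nil, fun w => ?_, List.Pairwise.nil⟩
    simp [pvDD]
  | cons lit rest ih =>
    intro p hpair hlb
    have hpair' := List.Pairwise.of_cons hpair
    have hhead : ∀ l' ∈ rest, pvVar lit ≤ pvVar l' := (List.pairwise_cons.mp hpair).1
    by_cases hp : p = some (pvVar lit)
    · -- skipped head
      have hlb' : ∀ v, p = some v → ∀ l' ∈ rest, v ≤ pvVar l' := by
        intro v hv l' hl'
        rw [hp] at hv
        rw [(Option.some.injEq _ _).mp hv.symm]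
        exact hhead l' hl'
      obtain ⟨hsub, hmemb, hstrict⟩ := ih p hpair' hlb'
      refine ⟨?_, ?_, ?_⟩
      · intro x hx
        simp only [pvDD, if_pos hp]  at hx
        exact List.mem_cons_of_mem _ (hsub x hx)
      · intro w
        simp only [pvDD, if_pos hp]
        rw [hmemb w]
        constructor
        · rintro ⟨hne, lit', hmem, rfl⟩
          exact ⟨hne, lit', List.mem_cons_of_mem _ hmem, rfl⟩
        · rintro ⟨hne, lit', hmem, rfl⟩
          rcases List.mem_cons.mp hmem with rfl | hmem'
          · exact absurd hp.symm hne
          · exact ⟨hne, lit', hmem', rfl⟩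
      · simpa only [pvDD, if_pos hp] using hstrict
    · -- emitted head
      have hlb' : ∀ v, some (pvVar lit) = some v → ∀ l' ∈ rest, v ≤ pvVar l' := by
        intro v hv l' hl'
        rw [← (Option.some.injEq _ _).mp hv]
        exact hhead l' hl'
      obtain ⟨hsub, hmemb, hstrict⟩ := ih (some (pvVar lit)) hpair' hlb'
      have hDD : pvDD p (lit :: rest) = lit :: pvDD (some (pvVar lit)) rest := by
        simp [pvDD, hp]
      have hgt : ∀ w ∈ (pvDD (some (pvVar lit)) rest).map pvVar, pvVar lit < w := by
        intro w hw
        rcases (hmemb w).mp hw with ⟨hne, lit', hmem, rfl⟩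
        exact lt_of_le_of_ne (hhead lit' hmem) (fun h => hne (by rw [h]))
      refine ⟨?_, ?_, ?_⟩
      · intro x hx
        rw [hDD] at hx
        rcases List.mem_cons.mp hx with rfl | hx'
        · exact List.mem_cons_self
        · exact List.mem_cons_of_mem _ (hsub x hx')
      · intro w
        rw [hDD, List.map_cons, List.mem_cons]
        constructor
        · rintro (rfl | hw)
          · exact ⟨fun h => hp h.symm, lit, List.mem_cons_self, rfl⟩
          · rcases (hmemb w).mp hw with ⟨hne, lit', hmem, rfl⟩
            refine ⟨?_, lit', List.mem_cons_of_mem _ hmem, rfl⟩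
            intro hcontra
            have h1 := hlb _ hcontra.symm lit List.mem_cons_self
            have h2 := hhead lit' hmem
            exact hne (congrArg some (le_antisymm h1 h2))
        · rintro ⟨hne, lit', hmem, rfl⟩
          rcases List.mem_cons.mp hmem with rfl | hmem'
          · exact Or.inl rfl
          · by_cases hw : pvVar lit' = pvVar lit
            · exact Or.inl hw
            · exact Or.inr ((hmemb _).mpr ⟨fun h => hw ((Option.some.injEq _ _).mp h), lit', hmem', rfl⟩)
      · rw [hDD, List.map_cons]
        exact List.pairwise_cons.mpr ⟨hgt, hstrict⟩

-- B's scan on a consistent sorted list emits exactly the adjacent dedup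
theorem pvScanB_some {polf : String → Bool} :
    ∀ (L : List String) (prev : Option (String × Bool)) (ordered : List String),
      (∀ pv pp, prev = some (pv, pp) → pp = polf pv) →
      (∀ lit ∈ L, pvIsPos lit = polf (pvVar lit)) →
      pvScanB L prev ordered = some (ordered ++ pvDD (prev.map Prod.fst) L) := by
  intro L
  induction L with
  | nil => intro prev ordered _ _; simp [pvScanB, pvDD]
  | cons lit rest ih =>
    intro prev ordered hprev hL
    have hhead := hL lit List.mem_cons_self
    have hrest : ∀ l' ∈ rest, pvIsPos l' = polf (pvVar l') :=
      fun l' h => hL l' (List.mem_cons_of_mem _ h)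
    have hnewprev : ∀ pv pp, some (pvVar lit, pvIsPos lit) = some (pv, pp) → pp = polf pv := by
      intro pv pp h
      obtain ⟨h1, h2⟩ := Prod.mk.injEq .. ▸ (Option.some.injEq _ _).mp h
      rw [← h2, ← h1]; exact hhead
    match prev with
    | none =>
      show pvScanB (lit :: rest) none ordered = _
      simp only [pvScanB]
      rw [ih (some (pvVar lit, pvIsPos lit)) (ordered ++ [lit]) hnewprev hrest]
      simp [pvDD, List.append_assoc]
    | some (pv, pp) =>
      by_cases hveq : pv = pvVar lit
      · have hpp : pp = pvIsPos lit := by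
          rw [hprev pv pp rfl, hveq, ← hhead]
        show pvScanB (lit :: rest) (some (pv, pp)) ordered = _
        simp only [pvScanB, if_pos hveq, if_pos hpp]
        rw [ih (some (pv, pp)) ordered hprev hrest]
        have hdd : pvDD (some pv) (lit :: rest) = pvDD (some pv) rest := by
          simp [pvDD, hveq]
        simp only [Option.map_some]
        rw [hdd]
      · show pvScanB (lit :: rest) (some (pv, pp)) ordered = _
        simp only [pvScanB, if_neg hveq]
        rw [ih (some (pvVar lit, pvIsPos lit)) (ordered ++ [lit]) hnewprev hrest]
        have hdd : pvDD (some pv) (lit :: rest) = lit :: pvDD (some (pvVar lit)) rest := by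
          simp only [pvDD]
          rw [if_neg (fun h => hveq ((Option.some.injEq _ _).mp h))]
        simp only [Option.map_some]
        rw [hdd, List.append_assoc, List.singleton_append]

-- B's scan on a sorted list containing both polarities of some variable breaks out
theorem pvScanB_none :
    ∀ (L : List String) (prev : Option (String × Bool)) (ordered : List String),
      L.Pairwise (fun a b => pvVar a ≤ pvVar b) →
      (∀ pv pp, prev = some (pv, pp) → ∀ lit ∈ L, pv ≤ pvVar lit) →
      ((∃ l1 ∈ L, ∃ l2 ∈ L, pvVar l1 = pvVar l2 ∧ pvIsPos l1 ≠ pvIsPos l2) ∨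
       (∃ pv pp, prev = some (pv, pp) ∧ ∃ l ∈ L, pvVar l = pv ∧ pvIsPos l ≠ pp)) →
      pvScanB L prev ordered = none := by
  intro L
  induction L with
  | nil =>
    intro prev ordered _ _ hbad
    rcases hbad with ⟨l1, h1, _⟩ | ⟨_, _, _, l, hl, _⟩
    · exact absurd h1 List.not_mem_nil
    · exact absurd hl List.not_mem_nil
  | cons lit rest ih =>
    intro prev ordered hpair hlb hbad
    have hpair' := List.Pairwise.of_cons hpair
    have hhead : ∀ l' ∈ rest, pvVar lit ≤ pvVar l' := (List.pairwise_cons.mp hpair).1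
    match prev with
    | some (pv, pp) =>
      by_cases hveq : pv = pvVar lit
      · by_cases hpp : pp = pvIsPos lit
        · -- duplicate: skip, recurse with the same prev
          simp only [pvScanB, if_pos hveq, if_pos hpp]
          apply ih (some (pv, pp)) ordered hpair'
          · intro pv' pp' h l' hl'
            obtain ⟨h1, _⟩ := Prod.mk.injEq .. ▸ (Option.some.injEq _ _).mp h
            rw [← h1, hveq]
            exact hhead l' hl'
          · rcases hbad with ⟨l1, h1, l2, h2, hv, hne⟩ | ⟨pv', pp', hprev', l, hl, hv, hne⟩
            · rcases List.mem_cons.mp h1 with rfl | h1'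
              · rcases List.mem_cons.mp h2 with rfl | h2'
                · exact absurd rfl hne
                · exact Or.inr ⟨pv, pp, rfl, l2, h2', by rw [← hv, ← hveq], by rw [hpp]; exact Ne.symm hne⟩
              · rcases List.mem_cons.mp h2 with rfl | h2'
                · exact Or.inr ⟨pv, pp, rfl, l1, h1', by rw [hv, ← hveq], by rw [hpp]; exact hne⟩
                · exact Or.inl ⟨l1, h1', l2, h2', hv, hne⟩
            · obtain ⟨h1, h2⟩ := Prod.mk.injEq .. ▸ (Option.some.injEq _ _).mp hprev'
              rcases List.mem_cons.mp hl with rfl | hl'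
              · exact absurd (hpp.symm.trans h2) hne
              · exact Or.inr ⟨pv', pp', hprev', l, hl', hv, hne⟩
        · -- opposite polarity: break
          simp only [pvScanB, if_pos hveq, if_neg hpp]
      · -- advance prev
        simp only [pvScanB, if_neg hveq]
        apply ih (some (pvVar lit, pvIsPos lit)) (ordered ++ [lit]) hpair'
        · intro pv' pp' h l' hl'
          obtain ⟨h1, _⟩ := Prod.mk.injEq .. ▸ (Option.some.injEq _ _).mp h
          rw [← h1]
          exact hhead l' hl'
        · rcases hbad with ⟨l1, h1, l2, h2, hv, hne⟩ | ⟨pv', pp', hprev', l, hl, hv, hne⟩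
          · rcases List.mem_cons.mp h1 with rfl | h1'
            · rcases List.mem_cons.mp h2 with rfl | h2'
              · exact absurd rfl hne
              · exact Or.inr ⟨pvVar l1, pvIsPos l1, rfl, l2, h2', hv.symm, Ne.symm hne⟩
            · rcases List.mem_cons.mp h2 with rfl | h2'
              · exact Or.inr ⟨pvVar l2, pvIsPos l2, rfl, l1, h1', hv, hne⟩
              · exact Or.inl ⟨l1, h1', l2, h2', hv, hne⟩
          · -- prev's variable cannot reappear after a strictly larger head: contradiction
            exfalso
            obtain ⟨h1, _⟩ := Prod.mk.injEq .. ▸ (Option.some.injEq _ _).mp hprev'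
            have hple : pv ≤ pvVar lit := hlb pv pp rfl lit List.mem_cons_self
            rcases List.mem_cons.mp hl with rfl | hl'
            · exact hveq (by rw [h1, hv])
            · have hge : pvVar lit ≤ pv := by
                rw [h1, ← hv]
                exact hhead l hl'
              exact hveq (le_antisymm hple hge)
    | none =>
      simp only [pvScanB]
      apply ih (some (pvVar lit, pvIsPos lit)) (ordered ++ [lit]) hpair'
      · intro pv' pp' h l' hl'
        obtain ⟨h1, _⟩ := Prod.mk.injEq .. ▸ (Option.some.injEq _ _).mp h
        rw [← h1]
        exact hhead l' hl'
      · rcases hbad with ⟨l1, h1, l2, h2, hv, hne⟩ | ⟨_, _, hprev', _⟩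
        · rcases List.mem_cons.mp h1 with rfl | h1'
          · rcases List.mem_cons.mp h2 with rfl | h2'
            · exact absurd rfl hne
            · exact Or.inr ⟨pvVar l1, pvIsPos l1, rfl, l2, h2', hv.symm, Ne.symm hne⟩
          · rcases List.mem_cons.mp h2 with rfl | h2'
            · exact Or.inr ⟨pvVar l2, pvIsPos l2, rfl, l1, h1', hv, hne⟩
            · exact Or.inl ⟨l1, h1', l2, h2', hv, hne⟩
        · exact absurd hprev' (by simp)

-- ==== the two per-clause steps agree ====
theorem pv_step_eq (acc : List (List String)) (clause : List String) :
    (match pvScanA clause PySem.Dict.empty with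
      | none => acc
      | some seen =>
          acc ++ [(PySem.List.sorted seen.items (fun item => item.1) false).map
            (fun item => if item.2 then item.1 else "~" ++ item.1)]) =
    (match pvScanB (PySem.List.sorted clause pvVar false) none [] with
      | none => acc
      | some ordered => acc ++ [ordered]) := by
  by_cases hok : pvOK clause
  · -- consistent clause: both emit the tagged sorted distinct variables
    set U := PySem.Set.union (pvPos clause) (pvNeg clause) with hU
    set polf : String → Bool := fun v => PySem.Set.contains (pvPos clause) v with hpolf
    have hl : ∀ lit ∈ clause, pvIsPos lit = polf (pvVar lit) :=
      fun lit h => (hok lit h).symm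
    -- A side
    rw [pvScanA_some hl PySem.Dict.empty
      (fun v b hb => by rw [PySem.Dict.get?_empty] at hb; cases hb)]
    have hkeys : (clause.foldl (fun d lit => d.insert (pvVar lit) (pvIsPos lit))
        PySem.Dict.empty).keys = PySem.Set.ofList (clause.map pvVar) := by
      have h := PySem.Dict.keys_foldl_insert_key (ν := Bool) clause pvVar
        (fun _ x => pvIsPos x) PySem.Dict.empty
      simpa [PySem.Dict.keys_empty, PySem.Set.update_nil_left] using h
    have hnodup : (clause.foldl (fun d lit => d.insert (pvVar lit) (pvIsPos lit))
        PySem.Dict.empty).keys.Nodup := by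
      rw [hkeys]; exact PySem.Set.nodup_ofList _
    have hval : ∀ v, ((clause.foldl (fun d lit => d.insert (pvVar lit) (pvIsPos lit))
        PySem.Dict.empty).getD v (polf v)) = polf v :=
      getD_foldl_pv hl PySem.Dict.empty (fun v => PySem.Dict.getD_empty _ _)
    set D := clause.foldl (fun d lit => d.insert (pvVar lit) (pvIsPos lit)) PySem.Dict.empty with hD
    have hitems : D.items = D.keys.map (fun k => (k, polf k)) := by
      rw [PySem.Dict.items_eq_map_keys D hnodup true]
      apply List.map_congr_left
      intro k hk
      congr 1
      have hcont : D.contains k = true := (PySem.Dict.contains_iff_mem_keys _ _).mpr hk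
      rw [PySem.Dict.contains_eq_isSome_get?] at hcont
      rcases Option.isSome_iff_exists.mp hcont with ⟨w, hw⟩
      rw [PySem.Dict.getD_eq_get?_getD, hw, Option.getD_some]
      have := hval k
      rw [PySem.Dict.getD_eq_get?_getD, hw, Option.getD_some] at this
      exact this
    have hposnd : List.Nodup (pvPos clause) := by
      unfold pvPos; exact PySem.Set.nodup_ofList _
    have hund : U.Nodup := PySem.Set.nodup_union _ _ hposnd
    -- B side
    set L := PySem.List.sorted clause pvVar false with hL
    have hLperm : L.Perm clause := PySem.List.sorted_perm _ _ _
    have hLpair : L.Pairwise (fun a b => pvVar a ≤ pvVar b) :=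
      PySem.List.sorted_pairwise clause pvVar
    have hlL : ∀ lit ∈ L, pvIsPos lit = polf (pvVar lit) :=
      fun lit h => hl lit (hLperm.mem_iff.mp h)
    rw [pvScanB_some L none [] (fun _ _ h => by cases h) hlL]
    simp only [Option.map_none, List.nil_append]
    set M := pvDD (none : Option String) L with hM
    obtain ⟨hsub, hmemb, hstrict⟩ :=
      pvDD_spec L none hLpair (fun v h => by cases h)
    have hMnodup : (M.map pvVar).Nodup := hstrict.imp ne_of_lt
    have hMperm : (M.map pvVar).Perm U := by
      rw [List.perm_ext_iff_of_nodup hMnodup hund]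
      intro w
      rw [hmemb w, hU, mem_union_iff]
      constructor
      · rintro ⟨_, lit, hlit, rfl⟩
        exact ⟨lit, hLperm.mem_iff.mp hlit, rfl⟩
      · rintro ⟨lit, hlit, rfl⟩
        exact ⟨by simp, lit, hLperm.mem_iff.mpr hlit, rfl⟩
    have hsortU : PySem.List.sorted U (fun v => v) false = M.map pvVar := by
      apply PySem.List.sorted_eq_of_perm_of_pairwise_lt
      · exact hMperm
      · exact hstrict
    have hMtag : (M.map pvVar).map (pvTag clause) = M := by
      rw [List.map_map]
      have : ∀ x ∈ M, (pvTag clause ∘ pvVar) x = x := by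
        intro x hx
        exact pvTag_self hok (hLperm.mem_iff.mp (hsub x hx))
      calc M.map (pvTag clause ∘ pvVar) = M.map id := List.map_congr_left this
        _ = M := List.map_id M
    -- both sides are acc ++ [(sorted U id).map (pvTag clause)]
    have hAside : (PySem.List.sorted D.items (fun item => item.1) false).map
        (fun item => if item.2 then item.1 else "~" ++ item.1) =
        (PySem.List.sorted U (fun v => v) false).map (pvTag clause) := by
      have hUkeys : U.Perm D.keys := by
        rw [List.perm_ext_iff_of_nodup hund hnodup]
        intro w
        rw [hU, mem_union_iff, hkeys, PySem.Set.mem_ofList]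
        simp
      have hsorted : PySem.List.sorted D.items (fun item => item.1) false =
          (PySem.List.sorted U (fun v => v) false).map (fun v => (v, polf v)) := by
        apply PySem.List.sorted_eq_of_perm_of_pairwise_lt
        · rw [hitems]
          exact ((PySem.List.sorted_perm _ _ _).map _).trans (hUkeys.map _)
        · rw [List.pairwise_map, hsortU]
          simpa using hstrict
      rw [hsorted, List.map_map]
      rfl
    rw [hAside, hsortU, hMtag]
  · -- tautological clause: both skip it
    rw [pvScanA_none hok]
    have hinter : PySem.Set.inter (pvPos clause) (pvNeg clause) ≠ [] := by
      intro h
      exact hok (empty_inter_iff.mp h)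
    rcases List.exists_mem_of_ne_nil _ hinter with ⟨v, hv⟩
    rcases (PySem.Set.mem_inter _ _ _).mp hv with ⟨hvpos, hvneg⟩
    rcases mem_pvPos_iff.mp hvpos with ⟨hvmem, hvp⟩
    rcases mem_pvNeg_iff.mp hvneg with ⟨lit, hmem, hneg, hvar⟩
    have hLperm : (PySem.List.sorted clause pvVar false).Perm clause :=
      PySem.List.sorted_perm _ _ _
    rw [pvScanB_none (PySem.List.sorted clause pvVar false) none []
      (PySem.List.sorted_pairwise clause pvVar)
      (fun _ _ h => by cases h)
      (Or.inl ⟨v, hLperm.mem_iff.mpr hvmem, lit, hLperm.mem_iff.mpr hmem,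
        by rw [pvVar_of_pos hvp, hvar],
        by rw [hvp, hneg]; exact fun h => Bool.true_eq_false.mp h⟩)]

-- ===== VERDICT (by name: the statement is the Claim_ definition above) =====
theorem normalise_clauses_py_spec : Claim_equal_normalise_clauses_py := by
  intro clauses hdom
  unfold Spec_normalise_clauses_py normalise_clauses_py normalise_clauses_py_alt
  induction clauses using List.reverseRecOn with
  | nil => rfl
  | append_singleton init clause ih =>
    have hdi : Dom_normalise_clauses_py init := by
      unfold Dom_normalise_clauses_py at hdom ⊢
      rw [List.all_append] at hdom
      exact ((Bool.and_eq_true _ _).mp hdom).1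
    rw [List.foldl_append, List.foldl_append, ih hdi]
    simp only [List.foldl_cons, List.foldl_nil]
    exact pv_step_eq _ clause
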